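-- pv_equiv track=rewrite | github.com/BB31420/char_freq_anal | doublewordcheckconcurrency.py | generate_combined_pattern
-- ===== SOURCE A (Python) =====
-- def generate_combined_pattern(word1, word2):
--     pattern1 = []
--     pattern2 = []
--     letter_map = {}
--     current_index = 0
--     for letter in word1 + word2:
--         if letter not in letter_map:
--             letter_map[letter] = current_index
--             current_index += 1
--     for letter in word1:
--         pattern1.append(letter_map[letter])
--     for letter in word2:
--         pattern2.append(letter_map[letter])
--     return pattern1, pattern2
-- ===== SOURCE B (Python) =====
-- def generate_combined_pattern(word1, word2):
--     combined = word1 + word2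
--
--     def code(letter):
--         # index assigned to a letter = number of distinct letters strictly
--         # before its first occurrence in word1+word2
--         return len(set(combined[:combined.index(letter)]))
--
--     return [code(c) for c in word1], [code(c) for c in word2]
-- ===== Notes on version B (the rewrite author's own statement) =====
-- stated objective: alternative
-- what changed: B keeps no mapping or counter state at all: each letter's code is computed by a per-letter closed form, the number of distinct letters before that letter's first occurrence in word1+word2 (len(set(combined[:combined.index(c)]))), instead of A's dict-building pass plus lookup passes.
import Mathlib
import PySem

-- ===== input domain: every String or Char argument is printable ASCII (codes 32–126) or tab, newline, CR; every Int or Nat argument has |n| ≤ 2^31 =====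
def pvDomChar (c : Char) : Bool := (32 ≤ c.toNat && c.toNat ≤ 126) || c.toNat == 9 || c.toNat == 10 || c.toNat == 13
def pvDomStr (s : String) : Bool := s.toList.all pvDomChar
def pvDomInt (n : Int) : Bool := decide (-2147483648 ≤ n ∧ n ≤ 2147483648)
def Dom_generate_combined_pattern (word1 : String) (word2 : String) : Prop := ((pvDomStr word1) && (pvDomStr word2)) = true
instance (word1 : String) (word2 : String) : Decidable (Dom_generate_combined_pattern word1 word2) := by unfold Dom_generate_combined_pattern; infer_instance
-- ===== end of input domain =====

-- B keeps no mapping/counter state: each letter's code is a per-letter closed form, the number of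
-- distinct letters before its first occurrence in word1+word2 (alternative decomposition; same value).

-- ===== PORT A =====
-- first loop of A: assign fresh indices, carrying (letter_map, current_index)
def gcpA_step (st : PySem.Dict Char Int × Int) (c : Char) : PySem.Dict Char Int × Int :=
  if st.1.contains c then st else (st.1.insert c st.2, st.2 + 1)

def generate_combined_pattern (word1 : String) (word2 : String) : List Int × List Int :=
  let st := (word1.toList ++ word2.toList).foldl gcpA_step (PySem.Dict.empty, 0)
  let letter_map := st.1
  -- letter_map[letter] always succeeds here (every letter was inserted); getD's default is unreachable
  let pattern1 := word1.toList.foldl (fun acc c => acc ++ [letter_map.getD c 0]) []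
  let pattern2 := word2.toList.foldl (fun acc c => acc ++ [letter_map.getD c 0]) []
  (pattern1, pattern2)

-- ===== PORT B =====
-- B's `code`: len(set(combined[:combined.index(letter)])); `letter` is always a member of
-- `combined` at every call site, so the `none` branch (Python would raise ValueError) is unreachable
def gcpB_code (combined : List Char) (letter : Char) : Int :=
  match PySem.List.index? combined letter with
  | some i => PySem.Set.len (PySem.Set.ofList (combined.take i))
  | none => 0

def generate_combined_pattern_alt (word1 : String) (word2 : String) : List Int × List Int :=
  let combined := word1.toList ++ word2.toList
  (word1.toList.map (gcpB_code combined), word2.toList.map (gcpB_code combined))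

-- ===== PRECONDITION & SPEC =====
def Spec_generate_combined_pattern (word1 : String) (word2 : String) (out : List Int × List Int) : Prop := out = generate_combined_pattern_alt word1 word2
instance (word1 : String) (word2 : String) (out : List Int × List Int) : Decidable (Spec_generate_combined_pattern word1 word2 out) := by unfold Spec_generate_combined_pattern; infer_instance

-- ===== CLAIM =====
def Claim_equal_generate_combined_pattern : Prop := ∀ (word1 : String) (word2 : String), Dom_generate_combined_pattern word1 word2 → Spec_generate_combined_pattern word1 word2 (generate_combined_pattern word1 word2)

-- ===== LEMMAS AND PROOFS =====

-- proof-side helper: A's dict evolution with the counter replaced by the dict's size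
def gcpDictStep (d : PySem.Dict Char Int) (c : Char) : PySem.Dict Char Int :=
  if d.contains c then d else d.insert c (d.size : Int)

theorem gcpDictStep_apply (d : PySem.Dict Char Int) (c : Char) :
    gcpDictStep d c = if d.contains c = true then d else d.insert c (d.size : Int) := rfl

theorem gcpB_code_of_index? (l : List Char) (c : Char) (i : Nat)
    (h : PySem.List.index? l c = some i) :
    gcpB_code l c = PySem.Set.len (PySem.Set.ofList (l.take i)) := by
  unfold gcpB_code; rw [h]

-- A's counter always equals the dict size, so A's fold is the dict fold paired with its size
theorem gcpA_fold_eq (l : List Char) (d : PySem.Dict Char Int) :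
    l.foldl gcpA_step (d, (d.size : Int)) = (l.foldl gcpDictStep d, ((l.foldl gcpDictStep d).size : Int)) := by
  induction l generalizing d with
  | nil => rfl
  | cons c cs ih =>
    simp only [List.foldl_cons, gcpA_step, gcpDictStep]
    by_cases h : d.contains c = true
    · simp [h, ih d]
    · simp only [h, Bool.false_eq_true, not_false_eq_true, if_neg]
      have := ih (d.insert c (d.size : Int))
      rw [PySem.Dict.size_insert] at this
      simp [h] at this
      simpa [push_cast] using this

-- one dict step advances the key set by one Python-set add
theorem gcp_keys_step (d : PySem.Dict Char Int) (c : Char) :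
    (gcpDictStep d c).keys = PySem.Set.add d.keys c := by
  rw [gcpDictStep_apply]
  by_cases h : d.contains c = true
  · have hm : c ∈ d.keys := (PySem.Dict.contains_iff_mem_keys d c).mp h
    simp [h, PySem.Set.add, PySem.Set.contains, hm]
  · have hm : c ∉ d.keys := fun m => h ((PySem.Dict.contains_iff_mem_keys d c).mpr m)
    rw [if_neg h, PySem.Dict.keys_insert_of_not_contains d _ (eq_false_of_ne_true h)]
    simp [PySem.Set.add, PySem.Set.contains, hm]

-- the dict's keys are exactly the first-occurrence distinct letters of the processed prefix
theorem gcp_keys_fold (l : List Char) (d : PySem.Dict Char Int) :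
    (l.foldl gcpDictStep d).keys = PySem.Set.update d.keys l := by
  induction l generalizing d with
  | nil => rfl
  | cons c cs ih =>
    rw [List.foldl_cons, ih, gcp_keys_step]
    rfl

theorem gcp_contains_fold (l : List Char) (c : Char) :
    ((l.foldl gcpDictStep PySem.Dict.empty).contains c) = decide (c ∈ l) := by
  rw [PySem.Dict.contains_eq_decide_mem_keys, gcp_keys_fold, PySem.Dict.keys_empty]
  have h : PySem.Set.update ([] : List Char) l = PySem.Set.ofList l := rfl
  rw [h]
  simp [PySem.Set.mem_ofList]

theorem gcp_size_fold (l : List Char) :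
    ((l.foldl gcpDictStep PySem.Dict.empty).size) = (PySem.Set.ofList l).length := by
  have h1 : ∀ d : PySem.Dict Char Int, d.size = d.keys.length := by
    intro d; simp [PySem.Dict.size, PySem.Dict.keys]
  rw [h1, gcp_keys_fold, PySem.Dict.keys_empty]
  rfl

-- main invariant: every letter of l is mapped to the number of distinct letters before its first occurrence
theorem gcp_get_fold (l : List Char) (c : Char) (hc : c ∈ l) :
    (l.foldl gcpDictStep PySem.Dict.empty).get? c = some (gcpB_code l c) := by
  induction l using List.reverseRecOn with
  | nil => cases hc
  | append_singleton p a ih =>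
    rw [List.foldl_append, List.foldl_cons, List.foldl_nil, gcpDictStep_apply]
    by_cases hcp : c ∈ p
    · -- c's binding and code come from p alone
      obtain ⟨i, hi⟩ := Option.isSome_iff_exists.mp ((PySem.List.index?_isSome_iff p c).mpr hcp)
      have hlt : i < p.length := by
        obtain ⟨pre, suf, hps, hlen, -⟩ := (PySem.List.index?_eq_some_iff p c i).mp hi
        subst hps; simp [← hlen]
      have hcode : gcpB_code (p ++ [a]) c = gcpB_code p c := by
        rw [gcpB_code_of_index? _ _ i (by rw [PySem.List.index?_append_of_mem _ hcp]; exact hi),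
            gcpB_code_of_index? _ _ i hi, List.take_append_of_le_length (by omega)]
      rw [hcode]
      by_cases ha : (p.foldl gcpDictStep PySem.Dict.empty).contains a = true
      · rw [if_pos ha]; exact ih hcp
      · rw [if_neg ha, PySem.Dict.get?_insert, if_neg, ih hcp]
        intro he; subst he
        rw [gcp_contains_fold] at ha
        simp [hcp] at ha
    · -- then c = a and a is fresh: it gets the current size, the distinct count of p
      have hca : c = a := by
        rcases List.mem_append.mp hc with h | h
        · exact absurd h hcp
        · simpa using h
      subst hca
      have hfresh : (p.foldl gcpDictStep PySem.Dict.empty).contains c = false := by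
        rw [gcp_contains_fold]; simp [hcp]
      rw [if_neg (by simp [hfresh]), PySem.Dict.get?_insert, if_pos rfl]
      congr 1
      rw [gcpB_code_of_index? _ _ p.length (PySem.List.index?_append_singleton_self p c hcp),
          List.take_append_of_le_length (le_refl _), List.take_length, gcp_size_fold]
      rfl

-- appending in a loop is mapping
theorem foldl_append_map (f : Char → Int) (l : List Char) (acc : List Int) :
    l.foldl (fun acc c => acc ++ [f c]) acc = acc ++ l.map f := by
  induction l generalizing acc with
  | nil => simp
  | cons c cs ih => simp [ih]

-- ===== VERDICT =====
theorem generate_combined_pattern_spec : Claim_equal_generate_combined_pattern := by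
  intro word1 word2 _
  unfold Spec_generate_combined_pattern generate_combined_pattern generate_combined_pattern_alt
  have hA : (word1.toList ++ word2.toList).foldl gcpA_step (PySem.Dict.empty, 0) =
      ((word1.toList ++ word2.toList).foldl gcpDictStep PySem.Dict.empty,
       (((word1.toList ++ word2.toList).foldl gcpDictStep PySem.Dict.empty).size : Int)) := by
    have := gcpA_fold_eq (word1.toList ++ word2.toList) PySem.Dict.empty
    simpa [PySem.Dict.size_empty] using this
  rw [hA]
  dsimp only
  rw [foldl_append_map, foldl_append_map]
  simp only [List.nil_append]
  have key : ∀ c ∈ word1.toList ++ word2.toList,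
      (((word1.toList ++ word2.toList).foldl gcpDictStep PySem.Dict.empty).getD c 0)
        = gcpB_code (word1.toList ++ word2.toList) c := by
    intro c hcm
    rw [PySem.Dict.getD_eq_get?_getD, gcp_get_fold _ _ hcm]
    rfl
  rw [List.map_congr_left (fun c hc => key c (List.mem_append_left _ hc)),
      List.map_congr_left (fun c hc => key c (List.mem_append_right _ hc))]
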